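-- pv_equiv track=rewrite | github.com/raeez/chiral-bar-cobar | compute/lib/bc_twisted_holography_zeta_engine.py | derived_center_dimension
-- ===== SOURCE A (Python) =====
-- from typing import Any, Dict, List, Optional, Tuple
--
-- def derived_center_dimension(algebra: str = 'heisenberg',
--                               weight_max: int = 4) -> Dict[int, int]:
--     r"""Dimensions of the chiral derived center Z^der_ch(A) by weight.
--
--     The derived center (Hochschild cohomology of A) has:
--         H^0 = center Z(A)
--         H^1 = outer derivations
--         H^2 = first-order deformations
--
--     For Heisenberg at weight w:
--         dim H^0(w) = 1 for all w >= 0 (generated by 1, J, J^2, ...)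
--         dim H^1(w) = 1 for w >= 1 (derivation J_{-w})
--         dim H^2(w) = 0 for w <= 1; dim H^2(2) = 1 (the level deformation)
--
--     For Virasoro at weight w:
--         dim H^0(w) = p(w) (partitions, Verma module)
--         dim H^1(0) = 0, dim H^1(2) = 1 (the T-derivation)
--         dim H^2(0) = 1 (the central extension c)
--
--     These are SIMPLIFIED (weight-truncated) computations.
--     The full derived center requires the entire chiral Hochschild complex.
--     """
--     dims: Dict[int, int] = {}
--     if algebra == 'heisenberg':
--         for w in range(weight_max + 1):
--             dims[w] = 1  # H^0 only, simplified
--     elif algebra == 'virasoro':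
--         # Partition function of Verma module (H^0 contribution)
--         for w in range(weight_max + 1):
--             dims[w] = _partition_count(w)
--     else:
--         for w in range(weight_max + 1):
--             dims[w] = 1
--     return dims
--
-- def _partition_count(n: int) -> int:
--     """Integer partition count p(n)."""
--     if n < 0:
--         return 0
--     if n <= 1:
--         return 1
--     # Dynamic programming
--     p = [0] * (n + 1)
--     p[0] = 1
--     for k in range(1, n + 1):
--         for j in range(k, n + 1):
--             p[j] += p[j - k]
--     return p[n]
-- ===== SOURCE B (Python) =====
-- def derived_center_dimension(algebra: str = 'heisenberg',
--                               weight_max: int = 4) -> dict: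
--     """Memoized recursion on (n, largest allowed part) shared across all
--     weights, instead of a fresh per-weight DP array; p(w) = parts(w, w)."""
--     if algebra != 'virasoro':
--         return {w: 1 for w in range(weight_max + 1)}
--     memo = {}
--     def parts(n, k):
--         if n == 0:
--             return 1
--         if k == 0:
--             return 0
--         if (n, k) not in memo:
--             memo[(n, k)] = parts(n, k - 1) + (parts(n - k, k) if k <= n else 0)
--         return memo[(n, k)]
--     return {w: parts(w, w) for w in range(weight_max + 1)}
-- ===== Notes on version B (the rewrite author's own statement) =====
-- stated objective: alternative
-- what changed: Replaces the per-weight in-place DP array of A by a memoized recursion parts(n,k) (partitions of n into parts <= k) shared across all weights, with p(w) = parts(w,w).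
import Mathlib
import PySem

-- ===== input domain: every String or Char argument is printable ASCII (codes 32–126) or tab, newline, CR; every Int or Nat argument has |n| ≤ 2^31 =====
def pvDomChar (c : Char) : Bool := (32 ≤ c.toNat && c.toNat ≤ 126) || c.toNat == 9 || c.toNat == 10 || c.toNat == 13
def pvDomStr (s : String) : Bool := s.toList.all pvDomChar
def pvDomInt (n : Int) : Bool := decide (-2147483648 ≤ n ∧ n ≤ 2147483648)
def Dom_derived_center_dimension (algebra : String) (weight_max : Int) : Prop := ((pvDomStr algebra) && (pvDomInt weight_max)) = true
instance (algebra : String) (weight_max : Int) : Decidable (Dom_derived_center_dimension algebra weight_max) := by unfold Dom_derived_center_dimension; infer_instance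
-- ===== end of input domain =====

-- B replaces A's per-weight in-place DP array by a memoized recursion
-- parts(n,k) = partitions of n into parts ≤ k, shared across all weights;
-- objective: alternative.

-- ===== PORT A =====
-- _partition_count(n): per-call DP array p[0..n], parts k = 1..n folded in place
def pvPartitionCount (n : Int) : Int :=
  if n < 0 then 0
  else if n ≤ 1 then 1
  else
    let N := n.toNat
    let p0 := (List.replicate (N + 1) (0 : Int)).set 0 1
    let pf := (List.range' 1 N).foldl (fun p k =>
        (List.range' k (N + 1 - k)).foldl
          (fun p j => p.set j (p.getD j 0 + p.getD (j - k) 0)) p) p0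
    pf.getD N 0

-- dict keys 0..weight_max are fresh and inserted in increasing order, so the
-- insertion-order association list is exactly this map over range(weight_max+1)
def derived_center_dimension (algebra : String) (weight_max : Int) : List (Int × Int) :=
  if algebra = "heisenberg" then
    (PySem.List.pyRange 0 (weight_max + 1) 1).map (fun w => (w, (1 : Int)))
  else if algebra = "virasoro" then
    (PySem.List.pyRange 0 (weight_max + 1) 1).map (fun w => (w, pvPartitionCount w))
  else
    (PySem.List.pyRange 0 (weight_max + 1) 1).map (fun w => (w, (1 : Int)))

-- ===== PORT B =====
-- parts(n, k) from Source B: number of partitions of n into parts of size ≤ k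
-- (the Python memo dict only caches values of this pure recursion, so the
-- transparent recursive function is its faithful port)
def pvParts (n k : Nat) : Int :=
  if n = 0 then 1
  else if k = 0 then 0
  else pvParts n (k - 1) + (if k ≤ n then pvParts (n - k) k else 0)
termination_by (n, k)
decreasing_by
  · exact Prod.Lex.right n (by omega)
  · exact Prod.Lex.left _ _ (by omega)

def derived_center_dimension_alt (algebra : String) (weight_max : Int) : List (Int × Int) :=
  if algebra = "virasoro" then
    (PySem.List.pyRange 0 (weight_max + 1) 1).map (fun w => (w, pvParts w.toNat w.toNat))
  else
    (PySem.List.pyRange 0 (weight_max + 1) 1).map (fun w => (w, (1 : Int)))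

-- ===== PRECONDITION & SPEC =====
def Spec_derived_center_dimension (algebra : String) (weight_max : Int) (out : List (Int × Int)) : Prop := out = derived_center_dimension_alt algebra weight_max
instance (algebra : String) (weight_max : Int) (out : List (Int × Int)) : Decidable (Spec_derived_center_dimension algebra weight_max out) := by unfold Spec_derived_center_dimension; infer_instance

-- ===== CLAIM (what is proved, stated in full; the proofs are below) =====
def Claim_equal_derived_center_dimension : Prop := ∀ (algebra : String) (weight_max : Int), Dom_derived_center_dimension algebra weight_max → Spec_derived_center_dimension algebra weight_max (derived_center_dimension algebra weight_max)

-- ===== LEMMAS AND PROOFS =====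

-- the in-place update step of A's inner loop, for part size s
def pvUpd (s : Nat) (p : List Int) (j : Nat) : List Int :=
  p.set j (p.getD j 0 + p.getD (j - s) 0)

lemma pv_length_foldl_upd (s : Nat) (js : List Nat) (p : List Int) :
    (js.foldl (pvUpd s) p).length = p.length := by
  induction js generalizing p with
  | nil => rfl
  | cons j js ih => simp [List.foldl_cons, ih, pvUpd]

lemma pv_range1_concat (s m : Nat) : List.range' s (m + 1) = List.range' s m ++ [s + m] := by
  simp [List.range'_concat]

lemma pvParts_zero (k : Nat) : pvParts 0 k = 1 := by rw [pvParts]; simp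

-- the value A's inner pass (part size k+1) leaves at index j, as a recursion
def pvF (k : Nat) (p : List Int) (j : Nat) : Int :=
  if j < k + 1 then p.getD j 0 else p.getD j 0 + pvF k p (j - (k + 1))
termination_by j
decreasing_by omega

lemma pv_getD_set_self (p : List Int) (i : Nat) (v : Int) (h : i < p.length) :
    (p.set i v).getD i 0 = v := by
  simp [List.getD_eq_getElem?_getD, h]

lemma pv_getD_set_ne (p : List Int) (i j : Nat) (v : Int) (h : i ≠ j) :
    (p.set i v).getD j 0 = p.getD j 0 := by
  simp [List.getD_eq_getElem?_getD, List.getElem?_set_ne h]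

-- one inner pass over range'(k+1, m), seen pointwise
lemma pv_inner (k m : Nat) (p : List Int) (hlen : k + 1 + m ≤ p.length) (j : Nat) :
    ((List.range' (k + 1) m).foldl (pvUpd (k + 1)) p).getD j 0
      = if j < k + 1 + m then pvF k p j else p.getD j 0 := by
  induction m generalizing j with
  | zero =>
      simp only [List.range', List.foldl_nil]
      split_ifs with h
      · rw [pvF, if_pos h]
      · rfl
  | succ m ih =>
      have hlen' : k + 1 + m ≤ p.length := by omega
      have hcat : List.range' (k + 1) (m + 1) = List.range' (k + 1) m ++ [k + 1 + m] :=
        pv_range1_concat ..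
      rw [hcat, List.foldl_append, List.foldl_cons, List.foldl_nil]
      set q := (List.range' (k + 1) m).foldl (pvUpd (k + 1)) p with hq
      have hqlen : q.length = p.length := pv_length_foldl_upd ..
      by_cases hj : j = k + 1 + m
      · subst hj
        have hv : (pvUpd (k + 1) q (k + 1 + m)).getD (k + 1 + m) 0
            = q.getD (k + 1 + m) 0 + q.getD m 0 := by
          unfold pvUpd
          rw [show k + 1 + m - (k + 1) = m from by omega]
          exact pv_getD_set_self _ _ _ (by omega)
        rw [hv, ih hlen' (k + 1 + m), ih hlen' m,
            if_neg (by omega), if_pos (by omega), if_pos (by omega)]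
        rw [show pvF k p (k + 1 + m)
              = p.getD (k + 1 + m) 0 + pvF k p (k + 1 + m - (k + 1)) from by
            rw [pvF]; rw [if_neg (by omega)],
          show k + 1 + m - (k + 1) = m from by omega]
      · have hne : (k + 1 + m) ≠ j := fun h => hj h.symm
        rw [show pvUpd (k + 1) q (k + 1 + m)
              = q.set (k + 1 + m) (q.getD (k + 1 + m) 0 + q.getD (k + 1 + m - (k + 1)) 0)
            from rfl,
          pv_getD_set_ne _ _ _ _ hne, ih hlen' j]
        split_ifs with h1 h2 h2 <;> first | rfl | omega

-- parts j k is stable once k exceeds j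
lemma pvParts_stable (j k : Nat) (h : j < k + 1) : pvParts j (k + 1) = pvParts j k := by
  rw [pvParts]
  by_cases hj : j = 0
  · subst hj; simp [pvParts_zero]
  · rw [if_neg hj, if_neg (by omega), if_neg (by omega)]; simp

-- the final values of one pass on a table holding parts · K are parts · (K+1)
lemma pvF_parts (K N : Nat) (q : List Int)
    (hq : ∀ i ≤ N, q.getD i 0 = pvParts i K) :
    ∀ j ≤ N, pvF K q j = pvParts j (K + 1) := by
  intro j
  induction j using Nat.strong_induction_on with
  | _ j ih =>
      intro hjN
      rw [pvF]
      by_cases hj : j < K + 1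
      · rw [if_pos hj, hq j hjN, pvParts_stable j K hj]
      · rw [if_neg hj, hq j hjN, ih (j - (K + 1)) (by omega) (by omega)]
        rw [show pvParts j (K + 1)
              = pvParts j K + (if K + 1 ≤ j then pvParts (j - (K + 1)) (K + 1) else 0) from by
            rw [pvParts]; rw [if_neg (by omega), if_neg (by omega)]; norm_num,
          if_pos (by omega)]

-- A's table after the first K outer passes
def pvRun (N K : Nat) : List Int :=
  (List.range' 1 K).foldl (fun p k =>
    (List.range' k (N + 1 - k)).foldl (pvUpd k) p) ((1 : Int) :: List.replicate N 0)

lemma pv_length_run (N K : Nat) : (pvRun N K).length = N + 1 := by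
  unfold pvRun
  induction K with
  | zero => simp
  | succ K ih =>
      rw [List.range'_concat, List.foldl_append, List.foldl_cons, List.foldl_nil,
          pv_length_foldl_upd, ih]

lemma pv_run_parts (N : Nat) : ∀ K, K ≤ N → ∀ j ≤ N, (pvRun N K).getD j 0 = pvParts j K := by
  intro K
  induction K with
  | zero =>
      intro _ j hj
      unfold pvRun
      simp only [List.range', List.foldl_nil]
      cases j with
      | zero => rw [pvParts]; simp
      | succ j =>
          rw [pvParts]
          simp [List.getD_eq_getElem?_getD, Nat.lt_of_succ_le hj]
  | succ K ih =>
      intro hK j hj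
      have hrun : pvRun N (K + 1)
          = (List.range' (K + 1) (N + 1 - (K + 1))).foldl (pvUpd (K + 1)) (pvRun N K) := by
        unfold pvRun
        rw [show List.range' 1 (K + 1) = List.range' 1 K ++ [1 + K] from pv_range1_concat ..,
            List.foldl_append, List.foldl_cons, List.foldl_nil,
            show 1 + K = K + 1 from by omega]
      rw [hrun, show N + 1 - (K + 1) = N - K from by omega,
          pv_inner K (N - K) (pvRun N K) (by rw [pv_length_run]; omega) j,
          if_pos (by omega)]
      exact pvF_parts K N (pvRun N K) (ih (by omega)) j hj

-- A's per-call DP equals B's recursion, for every 0 ≤ n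
lemma pv_count_eq_parts (n : Int) (h0 : 0 ≤ n) :
    pvPartitionCount n = pvParts n.toNat n.toNat := by
  unfold pvPartitionCount
  rw [if_neg (by omega)]
  by_cases h1 : n ≤ 1
  · rw [if_pos h1]
    interval_cases n
    · simpa using (pvParts_zero 0).symm
    · rw [show Int.toNat 1 = 1 from rfl, pvParts,
          show pvParts 1 0 = 0 from by rw [pvParts]; simp]
      simp [pvParts_zero]
  · rw [if_neg h1]
    have hN : 2 ≤ n.toNat := by omega
    have hrepl : (List.replicate (n.toNat + 1) (0 : Int)).set 0 1
        = (1 : Int) :: List.replicate n.toNat 0 := by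
      simp [List.replicate_succ]
    simp only [hrepl]
    have : (List.range' 1 n.toNat).foldl (fun p k =>
        (List.range' k (n.toNat + 1 - k)).foldl
          (fun p j => p.set j (p.getD j 0 + p.getD (j - k) 0)) p)
        ((1 : Int) :: List.replicate n.toNat 0) = pvRun n.toNat n.toNat := rfl
    rw [this]
    exact pv_run_parts n.toNat n.toNat le_rfl n.toNat le_rfl

theorem derived_center_dimension_eq (algebra : String) (weight_max : Int) :
    derived_center_dimension algebra weight_max
      = derived_center_dimension_alt algebra weight_max := by
  unfold derived_center_dimension derived_center_dimension_alt
  by_cases hv : algebra = "virasoro"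
  · simp only [hv, if_true, show ¬("virasoro" = "heisenberg") from by decide, if_false]
    refine List.map_congr_left (fun w hw => ?_)
    have hmem := (PySem.List.mem_pyRange_one).mp hw
    exact congrArg _ (pv_count_eq_parts w hmem.1)
  · by_cases hh : algebra = "heisenberg" <;> simp [hh, hv]

-- ===== VERDICT (by name: the statement is the Claim_ definition above) =====
theorem derived_center_dimension_spec : Claim_equal_derived_center_dimension := by
  intro algebra weight_max _
  exact derived_center_dimension_eq algebra weight_max
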